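-- pv_equiv track=rewrite | github.com/Luckcoffer/python- | 英语文本统计.py | merge_diction
-- ===== SOURCE A (Python) =====
-- def merge_diction(Diction):
--     merged = {}
--     for key,value in Diction.items():
--         lower_key = key.lower()
--         if lower_key in merged:
--             merged[lower_key] += value
--         else:
--             merged[lower_key] = value
--     return merged
-- ===== SOURCE B (Python) =====
-- def merge_diction(Diction):
--     # Two-pass group-then-reduce: first bucket every value under its
--     # lowercased key (encounter order preserved), then collapse each
--     # bucket with left-to-right addition.
--     groups = {}
--     for key, value in Diction.items():
--         groups.setdefault(key.lower(), []).append(value)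
--     merged = {}
--     for k, vs in groups.items():
--         acc = vs[0]
--         for v in vs[1:]:
--             acc = acc + v
--         merged[k] = acc
--     return merged
-- ===== Notes on version B (the rewrite author's own statement) =====
-- stated objective: alternative
-- what changed: Replaces A's single merge-as-you-go loop with a two-pass group-then-reduce: first bucket values per lowercased key into lists, then collapse each bucket by left-to-right addition into a fresh dict.
import Mathlib
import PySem

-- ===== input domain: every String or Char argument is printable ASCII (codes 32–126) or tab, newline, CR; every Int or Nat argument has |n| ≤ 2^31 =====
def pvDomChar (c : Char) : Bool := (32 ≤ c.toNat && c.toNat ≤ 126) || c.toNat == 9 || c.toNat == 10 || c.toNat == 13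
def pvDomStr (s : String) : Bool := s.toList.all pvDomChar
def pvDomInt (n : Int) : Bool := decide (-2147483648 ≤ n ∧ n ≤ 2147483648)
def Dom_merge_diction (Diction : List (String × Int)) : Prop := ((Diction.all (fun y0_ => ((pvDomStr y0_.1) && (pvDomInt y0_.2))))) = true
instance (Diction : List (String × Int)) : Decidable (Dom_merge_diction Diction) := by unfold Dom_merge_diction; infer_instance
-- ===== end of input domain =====

-- B replaces A's merge-as-you-go loop by a two-pass group-then-reduce (bucket values per
-- lowercased key, then collapse each bucket by left-to-right addition): an alternative
-- decomposition of the same task, proved to return exactly A's dict.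


-- ===== PORT A =====
-- one merge-as-you-go loop: merged[lk] += v when lk present, else merged[lk] = v
def merge_diction (Diction : List (String × Int)) : List (String × Int) :=
  (Diction.foldl
    (fun merged kv =>
      let lower_key := PySem.Str.lower kv.1
      if merged.contains lower_key then
        merged.modify lower_key 0 (fun x => x + kv.2)
      else
        merged.insert lower_key kv.2)
    PySem.Dict.empty).items

-- ===== PORT B =====
-- acc = vs[0]; for v in vs[1:]: acc = acc + v   (every bucket B builds is nonempty,
-- so the headD default is never read)
def pvReduceAdd (vs : List Int) : Int :=
  (vs.drop 1).foldl (fun acc v => acc + v) (vs.headD 0)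

def merge_diction_alt (Diction : List (String × Int)) : List (String × Int) :=
  let groups := Diction.foldl
    (fun g kv => g.modify (PySem.Str.lower kv.1) [] (fun vs => vs ++ [kv.2]))
    PySem.Dict.empty
  (groups.items.foldl
    (fun merged kv => merged.insert kv.1 (pvReduceAdd kv.2))
    PySem.Dict.empty).items

-- ===== PRECONDITION & SPEC =====
def Spec_merge_diction (Diction : List (String × Int)) (out : List (String × Int)) : Prop := out = merge_diction_alt Diction
instance (Diction : List (String × Int)) (out : List (String × Int)) : Decidable (Spec_merge_diction Diction out) := by unfold Spec_merge_diction; infer_instance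

-- ===== CLAIM (what is proved, stated in full; the proofs are below) =====
def Claim_equal_merge_diction : Prop := ∀ (Diction : List (String × Int)), Dom_merge_diction Diction → Spec_merge_diction Diction (merge_diction Diction)

-- ===== LEMMAS AND PROOFS =====

-- collapse a dict of buckets to the dict of their left-to-right reductions
def pvCol (g : PySem.Dict String (List Int)) : PySem.Dict String Int :=
  ⟨g.items.map (fun p => (p.1, pvReduceAdd p.2))⟩

theorem pvReduceAdd_append (vs : List Int) (v : Int) :
    pvReduceAdd (vs ++ [v]) = pvReduceAdd vs + v := by
  cases vs with
  | nil => simp [pvReduceAdd]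
  | cons x t => simp [pvReduceAdd, List.foldl_append]

theorem pvCol_contains (g : PySem.Dict String (List Int)) (k : String) :
    (pvCol g).contains k = g.contains k := by
  simp only [pvCol, PySem.Dict.contains, List.any_map]
  rfl

theorem pvCol_get? (g : PySem.Dict String (List Int)) (k : String) :
    (pvCol g).get? k = (g.get? k).map pvReduceAdd := by
  simp only [pvCol, PySem.Dict.get?]
  induction g.items with
  | nil => simp
  | cons p t ih =>
    by_cases h : p.1 == k
    · simp [List.find?, h]
    · simp only [List.map_cons, List.find?, h, Bool.false_eq_true] at *
      exact ih

-- per-step correspondence: B's bucket update collapses to A's merge step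
theorem pvCol_step (g : PySem.Dict String (List Int)) (k : String) (v : Int) :
    pvCol (g.modify k [] (fun vs => vs ++ [v])) =
      (if (pvCol g).contains k then (pvCol g).modify k 0 (fun x => x + v)
       else (pvCol g).insert k v) := by
  rw [pvCol_contains]
  by_cases h : g.contains k
  · have hc : (pvCol g).contains k = true := by rw [pvCol_contains]; exact h
    simp only [h, if_true]
    have hfind : (g.items.find? (fun p => p.1 == k)).isSome := by
      rw [List.find?_isSome]
      simpa [PySem.Dict.contains, List.any_eq_true] using h
    obtain ⟨q, hq⟩ := Option.isSome_iff_exists.mp hfind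
    have hw : g.get? k = some q.2 := by simp [PySem.Dict.get?, hq]
    have hgd : g.getD k [] = q.2 := by simp [PySem.Dict.getD, hw]
    have hcd : (pvCol g).getD k 0 = pvReduceAdd q.2 := by
      simp [PySem.Dict.getD, pvCol_get?, hw]
    rw [PySem.Dict.modify, PySem.Dict.modify, hcd, hgd]
    apply PySem.Dict.ext
    rw [PySem.Dict.items_insert_of_contains (pvCol g) (pvReduceAdd q.2 + v) hc]
    show ((g.insert k (q.2 ++ [v])).items.map (fun p => (p.1, pvReduceAdd p.2)))
        = (g.items.map (fun p => (p.1, pvReduceAdd p.2))).map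
            (fun p => if (p.1 == k) = true then (k, pvReduceAdd q.2 + v) else p)
    rw [PySem.Dict.items_insert_of_contains g (q.2 ++ [v]) h, List.map_map, List.map_map]
    apply List.map_congr_left
    intro p _
    by_cases hp : p.1 == k
    · simp [Function.comp, hp, pvReduceAdd_append]
    · simp [Function.comp, hp]
  · have hb : g.contains k = false := by simpa using h
    have hc : (pvCol g).contains k = false := by rw [pvCol_contains]; exact hb
    simp only [hb, Bool.false_eq_true, if_false]
    have hg? : g.get? k = none := (PySem.Dict.get?_eq_none_iff_contains g k).mpr hb
    have hgd : g.getD k [] = [] := by simp [PySem.Dict.getD, hg?]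
    rw [PySem.Dict.modify, hgd]
    apply PySem.Dict.ext
    show ((g.insert k ([] ++ [v])).items.map (fun p => (p.1, pvReduceAdd p.2)))
        = ((pvCol g).insert k v).items
    rw [PySem.Dict.items_insert_of_not_contains g ([] ++ [v]) hb,
        PySem.Dict.items_insert_of_not_contains (pvCol g) v hc]
    simp [pvCol, pvReduceAdd]

-- whole first loop: A's dict is the collapse of B's bucket dict
theorem pvCol_foldl (D : List (String × Int)) (g : PySem.Dict String (List Int)) :
    D.foldl
      (fun merged kv =>
        let lower_key := PySem.Str.lower kv.1
        if merged.contains lower_key then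
          merged.modify lower_key 0 (fun x => x + kv.2)
        else
          merged.insert lower_key kv.2)
      (pvCol g)
    = pvCol (D.foldl
        (fun g kv => g.modify (PySem.Str.lower kv.1) [] (fun vs => vs ++ [kv.2])) g) := by
  induction D generalizing g with
  | nil => rfl
  | cons kv t ih =>
    simp only [List.foldl_cons]
    rw [← pvCol_step g (PySem.Str.lower kv.1) kv.2]
    exact ih _

-- B's first loop keeps bucket keys nodup
theorem pvGroups_nodup (D : List (String × Int)) (g : PySem.Dict String (List Int))
    (hg : g.keys.Nodup) :
    (D.foldl
      (fun g kv => g.modify (PySem.Str.lower kv.1) [] (fun vs => vs ++ [kv.2])) g).keys.Nodup := by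
  induction D generalizing g with
  | nil => exact hg
  | cons kv t ih =>
    simp only [List.foldl_cons, PySem.Dict.modify]
    exact ih _ (PySem.Dict.nodup_keys_insert _ _ _ hg)

-- B's second loop on a nodup-keyed item list just maps the reduction over it
theorem pvSecond_pass (l : List (String × List Int)) (acc : PySem.Dict String Int)
    (hdisj : ∀ p ∈ l, acc.contains p.1 = false)
    (hnd : (l.map (fun p => p.1)).Nodup) :
    (l.foldl (fun merged kv => merged.insert kv.1 (pvReduceAdd kv.2)) acc).items
      = acc.items ++ l.map (fun kv => (kv.1, pvReduceAdd kv.2)) := by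
  induction l generalizing acc with
  | nil => simp
  | cons p t ih =>
    simp only [List.foldl_cons, List.map_cons]
    have hins := PySem.Dict.items_insert_of_not_contains acc (pvReduceAdd p.2)
      (hdisj p (List.mem_cons_self))
    simp only [List.map_cons, List.nodup_cons] at hnd
    rw [ih (acc.insert p.1 (pvReduceAdd p.2))
        (fun q hq => by
          have h1 : acc.contains q.1 = false := hdisj q (List.mem_cons_of_mem _ hq)
          have h2 : ¬ (q.1 = p.1) := fun he =>
            hnd.1 (he ▸ List.mem_map_of_mem hq)
          rw [PySem.Dict.contains_insert]
          simp [h1, h2])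
        hnd.2, hins]
    simp

-- ===== VERDICT (by name: the statement is the Claim_ definition above) =====
theorem merge_diction_spec : Claim_equal_merge_diction := by
  intro D _
  unfold Spec_merge_diction
  set G := D.foldl (fun g kv => g.modify (PySem.Str.lower kv.1) [] (fun vs => vs ++ [kv.2]))
    (PySem.Dict.empty : PySem.Dict String (List Int)) with hG
  have ha : merge_diction D
      = (D.foldl
          (fun merged kv =>
            let lower_key := PySem.Str.lower kv.1
            if merged.contains lower_key then
              merged.modify lower_key 0 (fun x => x + kv.2)
            else
              merged.insert lower_key kv.2)
          (pvCol PySem.Dict.empty)).items := rfl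
  have halt : merge_diction_alt D
      = (G.items.foldl
          (fun merged kv => merged.insert kv.1 (pvReduceAdd kv.2))
          PySem.Dict.empty).items := rfl
  have hnd : G.keys.Nodup := pvGroups_nodup D _ PySem.Dict.nodup_keys_empty
  rw [ha, halt, pvCol_foldl D PySem.Dict.empty, ← hG,
      pvSecond_pass G.items PySem.Dict.empty
        (fun p _ => by simp [PySem.Dict.contains, PySem.Dict.empty])
        (by simpa [PySem.Dict.keys] using hnd)]
  simp [pvCol, PySem.Dict.empty]
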